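-- pv_equiv track=rewrite | github.com/KyeongGeun/boj | programmers/lv3/110_옮기기.py | solution
-- ===== SOURCE A (Python) =====
-- def solution(s):
--     answer = []
--
--     for c in s:
--         li = []
--         l = 0
--         llo = 0
--         for x in c:
--             if x == '1':
--                 l += 1
--             elif l > 1:
--                 l -= 2
--                 llo += 1
--             else:
--                 if l:
--                     li.append('1' * l)
--                     l = 0
--                 li.append('0')
--
--         if llo:
--             li.append('110' * llo)
--         if l:
--             li.append('1' * l)
--
--         answer.append(''.join(li))
--
--     return answer
-- ===== SOURCE B (Python) =====
-- def solution(s):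
--     answer = []
--     for c in s:
--         # explicit stack of bits; a greedy pop of each "110" group, counted
--         stack = []
--         cnt = 0
--         for x in c:
--             stack.append('1' if x == '1' else '0')  # A treats every non-'1' char as '0'
--             if stack[-3:] == ['1', '1', '0']:
--                 del stack[-3:]
--                 cnt += 1
--         idx = len(stack)
--         while idx > 0 and stack[idx - 1] == '1':
--             idx -= 1
--         answer.append(''.join(stack[:idx]) + '110' * cnt + ''.join(stack[idx:]))
--     return answer
-- ===== Notes on version B (the rewrite author's own statement) =====
-- stated objective: alternative
-- what changed: Replaces A's two incremental integer counters and segment list with an explicit character stack that greedily pops each '110' group while counting them, then splices the counted blocks back before the trailing run of '1's found by a backward scan.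
import Mathlib
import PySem

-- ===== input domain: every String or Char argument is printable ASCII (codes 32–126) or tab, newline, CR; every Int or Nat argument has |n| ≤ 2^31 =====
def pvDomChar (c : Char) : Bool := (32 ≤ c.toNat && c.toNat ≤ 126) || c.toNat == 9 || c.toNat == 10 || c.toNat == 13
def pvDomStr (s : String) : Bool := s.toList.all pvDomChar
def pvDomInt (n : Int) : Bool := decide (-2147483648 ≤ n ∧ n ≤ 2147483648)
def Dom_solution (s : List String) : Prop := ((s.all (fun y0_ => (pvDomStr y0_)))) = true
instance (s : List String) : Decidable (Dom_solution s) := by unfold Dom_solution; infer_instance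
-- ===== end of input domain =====

-- B replaces A's incremental counters with an explicit stack that greedily pops each "110"
-- group and splices the counted groups back before the trailing '1'-run (alternative, same cost).

-- ===== PORT A =====
-- inner-loop body of A: state (li, l, llo)
def stepA (st : List (List Char) × Int × Int) (x : Char) : List (List Char) × Int × Int :=
  if x = '1' then (st.1, st.2.1 + 1, st.2.2)
  else if st.2.1 > 1 then (st.1, st.2.1 - 2, st.2.2 + 1)
  else
    -- 'if l:' then append '1'*l and reset l; then append '0'
    let p := if st.2.1 ≠ 0 then (st.1 ++ [List.replicate st.2.1.toNat '1'], (0 : Int)) else (st.1, st.2.1)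
    (p.1 ++ [['0']], p.2, st.2.2)

def solutionLineA (c : List Char) : List Char :=
  let st := c.foldl stepA ([], 0, 0)
  -- 'if llo: li.append('110'*llo)'; 'if l: li.append('1'*l)'; ''.join(li)
  let li := if st.2.2 ≠ 0 then st.1 ++ [(List.replicate st.2.2.toNat ['1', '1', '0']).flatten] else st.1
  let li := if st.2.1 ≠ 0 then li ++ [List.replicate st.2.1.toNat '1'] else li
  li.flatten

def solution (s : List String) : List String :=
  s.map (fun c => String.ofList (solutionLineA c.toList))

-- ===== PORT B =====
-- inner-loop body of B: state (stack, cnt); stack[-3:] / del stack[-3:] via PySem slices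
def stepB (st : List Char × Int) (x : Char) : List Char × Int :=
  let stack := st.1 ++ [if x = '1' then '1' else '0']
  if PySem.List.slice stack (some (-3)) none = ['1', '1', '0'] then
    (PySem.List.slice stack none (some (-3)), st.2 + 1)
  else (stack, st.2)

-- 'while idx > 0 and stack[idx-1] == '1': idx -= 1'
def idxLoop (stack : List Char) (idx : Nat) : Nat :=
  if idx > 0 ∧ stack[idx - 1]? = some '1' then idxLoop stack (idx - 1) else idx
termination_by idx
decreasing_by omega

def solutionLineB (c : List Char) : List Char :=
  let st := c.foldl stepB ([], 0)
  let idx := idxLoop st.1 st.1.length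
  st.1.take idx ++ (List.replicate st.2.toNat ['1', '1', '0']).flatten ++ st.1.drop idx

def solution_alt (s : List String) : List String :=
  s.map (fun c => String.ofList (solutionLineB c.toList))

-- ===== PRECONDITION & SPEC =====
def Spec_solution (s : List String) (out : List String) : Prop := out = solution_alt s
instance (s : List String) (out : List String) : Decidable (Spec_solution s out) := by unfold Spec_solution; infer_instance

-- ===== CLAIM (what is proved, stated in full; the proofs are below) =====
def Claim_equal_solution : Prop := ∀ (s : List String), Dom_solution s → Spec_solution s (solution s)

-- ===== LEMMAS AND PROOFS =====

-- invariant on A's state: counters nonnegative and the joined segments end in '0' (or are empty)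
def GoodA (st : List (List Char) × Int × Int) : Prop :=
  0 ≤ st.2.1 ∧ 0 ≤ st.2.2 ∧ (st.1.flatten = [] ∨ ∃ G, st.1.flatten = G ++ ['0'])

-- B's pop test, read from the back of the stack
theorem cond_iff (stack : List Char) :
    (PySem.List.slice stack (some (-3)) none = ['1', '1', '0'])
      ↔ stack.reverse.take 3 = ['0', '1', '1'] := by
  rw [PySem.List.slice_from_neg_ofNat stack 3 (by norm_num)]
  rw [show stack.drop (stack.length - 3) = (stack.reverse.take 3).reverse from by
    rw [List.take_reverse, List.reverse_reverse]]
  rw [show (['1', '1', '0'] : List Char) = (['0', '1', '1'] : List Char).reverse from rfl]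
  exact List.reverse_inj

-- B's stack is A's joined segments followed by l ones, and B's counter is llo
theorem step_rel (st : List (List Char) × Int × Int) (h : GoodA st) (x : Char) :
    stepB (st.1.flatten ++ List.replicate st.2.1.toNat '1', st.2.2) x
      = ((stepA st x).1.flatten ++ List.replicate (stepA st x).2.1.toNat '1', (stepA st x).2.2)
    ∧ GoodA (stepA st x) := by
  obtain ⟨li, l, llo⟩ := st
  obtain ⟨hl, hllo, hF⟩ := h
  lift l to ℕ using hl with k
  simp only [Int.toNat_natCast]
  by_cases hx : x = '1'
  · subst hx
    have hsA : stepA (li, (k : Int), llo) '1' = (li, (k : Int) + 1, llo) := by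
      simp [stepA]
    have hsB : stepB (li.flatten ++ List.replicate k '1', llo) '1'
        = (li.flatten ++ List.replicate (k + 1) '1', llo) := by
      simp [stepB, cond_iff, List.reverse_append, List.replicate_succ', List.append_assoc]
    rw [hsB, hsA]
    have hk1 : ((k : Int) + 1).toNat = k + 1 := by omega
    exact ⟨by simp [hk1], by change (0 : ℤ) ≤ (k : Int) + 1; omega, hllo, hF⟩
  · by_cases hk2 : (1 : Int) < (k : Int)
    · -- l > 1 : pop a full '110' group
      obtain ⟨k', rfl⟩ : ∃ k', k = k' + 2 := ⟨k - 2, by omega⟩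
      have htail : List.replicate (k' + 2) '1' ++ ['0']
          = List.replicate k' '1' ++ ['1', '1', '0'] := by
        rw [List.replicate_add]; simp [List.append_assoc]
      have hsB : stepB (li.flatten ++ List.replicate (k' + 2) '1', llo) x
          = (li.flatten ++ List.replicate k' '1', llo + 1) := by
        have hstack : (li.flatten ++ List.replicate (k' + 2) '1') ++ [if x = '1' then '1' else '0']
            = (li.flatten ++ List.replicate k' '1') ++ ['1', '1', '0'] := by
          simp [hx, List.append_assoc, htail]
        simp only [stepB, hstack, cond_iff]
        rw [if_pos (by simp [List.reverse_append])]
        rw [PySem.List.slice_to_neg_ofNat _ 3 (by norm_num)]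
        have hlen : ((li.flatten ++ List.replicate k' '1') ++ ['1', '1', '0']).length - 3
            = (li.flatten ++ List.replicate k' '1').length := by simp; omega
        rw [hlen, List.take_left]
      have hsA : stepA (li, ((k' + 2 : ℕ) : Int), llo) x
          = (li, (k' : Int), llo + 1) := by
        have hc : (1 : Int) < (k' : Int) + 2 := by omega
        simp [stepA, hx, hc]
      rw [hsB, hsA]
      exact ⟨by simp, by change (0 : ℤ) ≤ (k' : Int); omega,
        by change (0 : ℤ) ≤ llo + 1; omega, hF⟩
    · -- l is 0 or 1 : flush the pending '1's and push '0'
      have hk1 : k ≤ 1 := by omega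
      interval_cases k
      · have hsA : stepA (li, ((0 : ℕ) : Int), llo) x = (li ++ [['0']], 0, llo) := by
          simp [stepA, hx]
        have hsB : stepB (li.flatten ++ List.replicate 0 '1', llo) x
            = (li.flatten ++ ['0'], llo) := by
          rcases hF with hF | ⟨G, hF⟩ <;>
            simp [stepB, cond_iff, hx, hF, List.reverse_append]
        rw [hsB, hsA]
        exact ⟨by simp, le_refl 0, hllo, Or.inr ⟨li.flatten, by simp⟩⟩
      · have hsA : stepA (li, ((1 : ℕ) : Int), llo) x = (li ++ [['1'], ['0']], 0, llo) := by
          simp [stepA, hx]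
        have hsB : stepB (li.flatten ++ List.replicate 1 '1', llo) x
            = (li.flatten ++ ['1', '0'], llo) := by
          rcases hF with hF | ⟨G, hF⟩ <;>
            simp [stepB, cond_iff, hx, hF, List.reverse_append]
        rw [hsB, hsA]
        exact ⟨by simp, le_refl 0, hllo, Or.inr ⟨li.flatten ++ ['1'], by simp⟩⟩

theorem fold_rel (cs : List Char) :
    ∀ (st : List (List Char) × Int × Int), GoodA st →
    cs.foldl stepB (st.1.flatten ++ List.replicate st.2.1.toNat '1', st.2.2)
      = ((cs.foldl stepA st).1.flatten ++ List.replicate (cs.foldl stepA st).2.1.toNat '1',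
         (cs.foldl stepA st).2.2)
    ∧ GoodA (cs.foldl stepA st) := by
  induction cs with
  | nil => intro st h; exact ⟨rfl, h⟩
  | cons x cs ih =>
    intro st h
    obtain ⟨he, hg⟩ := step_rel st h x
    simpa [List.foldl_cons, he] using ih (stepA st x) hg

theorem idxLoop_go (F : List Char) (hF : F = [] ∨ ∃ G, F = G ++ ['0']) (m : Nat) :
    ∀ k, k ≤ m → idxLoop (F ++ List.replicate m '1') (F.length + k) = F.length := by
  intro k
  induction k with
  | zero =>
    intro _
    have hneg : ¬ (F.length + 0 > 0 ∧ (F ++ List.replicate m '1')[F.length + 0 - 1]? = some '1') := by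
      rintro ⟨hpos, hget⟩
      rcases hF with hF | ⟨G, hF⟩
      · simp [hF] at hpos
      · subst hF
        rw [show (G ++ ['0']).length + 0 - 1 = G.length by simp] at hget
        rw [List.append_assoc, List.getElem?_append_right (by omega)] at hget
        simp at hget
    rw [idxLoop, if_neg hneg]
    omega
  | succ k ih =>
    intro hk
    have hpos : (F.length + (k + 1) > 0 ∧ (F ++ List.replicate m '1')[F.length + (k + 1) - 1]? = some '1') := by
      refine ⟨by omega, ?_⟩
      rw [show F.length + (k + 1) - 1 = F.length + k by omega,
        List.getElem?_append_right (by omega)]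
      simp [show k < m by omega]
    rw [idxLoop, if_pos hpos, show F.length + (k + 1) - 1 = F.length + k by omega]
    exact ih (by omega)

theorem line_eq (c : List Char) : solutionLineB c = solutionLineA c := by
  obtain ⟨he, hg⟩ := fold_rel c ([], 0, 0) ⟨le_refl 0, le_refl 0, Or.inl rfl⟩
  obtain ⟨hl, hllo, hF⟩ := hg
  have he' : c.foldl stepB ([], 0)
      = ((c.foldl stepA ([], 0, 0)).1.flatten
          ++ List.replicate (c.foldl stepA ([], 0, 0)).2.1.toNat '1',
         (c.foldl stepA ([], 0, 0)).2.2) := by simpa using he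
  simp only [solutionLineB, solutionLineA, he']
  generalize hA : c.foldl stepA ([], 0, 0) = a at *
  obtain ⟨li, l, llo⟩ := a
  dsimp only at *
  have hlen : (li.flatten ++ List.replicate l.toNat '1').length
      = li.flatten.length + l.toNat := by simp
  rw [hlen, idxLoop_go li.flatten hF l.toNat l.toNat le_rfl, List.take_left, List.drop_left]
  by_cases h1 : llo = 0 <;> by_cases h2 : l = 0 <;>
    simp [h1, h2, List.flatten_append]

-- ===== VERDICT (by name: the statement is the Claim_ definition above) =====
theorem solution_spec : Claim_equal_solution := by
  intro s _
  unfold Spec_solution solution solution_alt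
  simp [line_eq]
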